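-- pv_equiv track=rewrite | github.com/zhuyuanxiang/Learn-to-Pack | learn_to_pack/geometry/geofunc.py | checkBoundPt
-- ===== SOURCE A (Python) =====
-- def checkBoundPt(poly):
--     '''获得边界的点'''
--     left, bottom, right, top = poly[0], poly[0], poly[0], poly[0]
--     for i, pt in enumerate(poly):
--         if pt[0] < left[0]:
--             left = pt
--         if pt[0] > right[0]:
--             right = pt
--         if pt[1] > top[1]:
--             top = pt
--         if pt[1] < bottom[1]:
--             bottom = pt
--     return left, bottom, right, top
-- ===== SOURCE B (Python) =====
-- def checkBoundPt(poly):
--     '''获得边界的点'''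
--     left = min(poly, key=lambda p: p[0])
--     bottom = min(poly, key=lambda p: p[1])
--     right = max(poly, key=lambda p: p[0])
--     top = max(poly, key=lambda p: p[1])
--     return left, bottom, right, top
-- ===== Notes on version B (the rewrite author's own statement) =====
-- stated objective: idiomatic
-- what changed: Replaced the single four-accumulator loop with four independent min/max calls with a key; min/max return the first extremal element, matching A's strict-inequality tie-breaking.
import Mathlib
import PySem

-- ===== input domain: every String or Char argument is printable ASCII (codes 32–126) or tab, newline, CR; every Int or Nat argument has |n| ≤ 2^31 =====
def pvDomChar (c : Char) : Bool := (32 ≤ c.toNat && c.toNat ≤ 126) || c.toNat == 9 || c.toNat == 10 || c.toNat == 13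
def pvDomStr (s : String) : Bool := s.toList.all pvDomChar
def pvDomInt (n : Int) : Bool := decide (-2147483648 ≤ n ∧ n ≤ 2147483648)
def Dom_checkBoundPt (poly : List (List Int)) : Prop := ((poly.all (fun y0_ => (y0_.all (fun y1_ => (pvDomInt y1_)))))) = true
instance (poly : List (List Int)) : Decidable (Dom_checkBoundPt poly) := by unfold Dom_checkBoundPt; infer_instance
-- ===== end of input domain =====

-- B replaces A's single four-accumulator loop with four independent min/max-by-key passes (idiomatic; same return value).

-- ===== PORT A =====
def checkBoundPt (poly : List (List Int)) : List Int × List Int × List Int × List Int :=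
  let p0 := PySem.List.pyGetD poly 0 []
  poly.foldl
    (fun (s : List Int × List Int × List Int × List Int) pt =>
      (if PySem.List.pyGetD pt 0 0 < PySem.List.pyGetD s.1 0 0 then pt else s.1,
       if PySem.List.pyGetD pt 1 0 < PySem.List.pyGetD s.2.1 1 0 then pt else s.2.1,
       if PySem.List.pyGetD pt 0 0 > PySem.List.pyGetD s.2.2.1 0 0 then pt else s.2.2.1,
       if PySem.List.pyGetD pt 1 0 > PySem.List.pyGetD s.2.2.2 1 0 then pt else s.2.2.2))
    (p0, p0, p0, p0)

-- ===== PORT B =====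
def cbpKey0 (p : List Int) : Int := PySem.List.pyGetD p 0 0
def cbpKey1 (p : List Int) : Int := PySem.List.pyGetD p 1 0

def checkBoundPt_alt (poly : List (List Int)) : List Int × List Int × List Int × List Int :=
  ((PySem.List.min? poly cbpKey0).getD [],
   (PySem.List.min? poly cbpKey1).getD [],
   (PySem.List.max? poly cbpKey0).getD [],
   (PySem.List.max? poly cbpKey1).getD [])

-- ===== PRECONDITION & SPEC =====
-- Pre_ excludes exactly the inputs where the Python A raises IndexError: the empty list (poly[0])
-- and points with fewer than 2 coordinates (pt[0]/pt[1]).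
def Pre_checkBoundPt (poly : List (List Int)) : Prop :=
  poly ≠ [] ∧ ∀ pt ∈ poly, 2 ≤ pt.length
instance (poly : List (List Int)) : Decidable (Pre_checkBoundPt poly) := by unfold Pre_checkBoundPt; infer_instance
def pvWitness_checkBoundPt : List (List Int) := [[0, 0], [1, 2], [-3, 1]]

def Spec_checkBoundPt (poly : List (List Int)) (out : List Int × List Int × List Int × List Int) : Prop := out = checkBoundPt_alt poly
instance (poly : List (List Int)) (out : List Int × List Int × List Int × List Int) : Decidable (Spec_checkBoundPt poly out) := by unfold Spec_checkBoundPt; infer_instance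

-- ===== CLAIM (what is proved, stated in full; the proofs are below) =====
def Claim_equal_checkBoundPt : Prop := ∀ (poly : List (List Int)), Dom_checkBoundPt poly → Pre_checkBoundPt poly → Spec_checkBoundPt poly (checkBoundPt poly)

-- ===== LEMMAS AND PROOFS =====

lemma min?_cons (key : List Int → Int) (p : List Int) (t : List (List Int)) :
    PySem.List.min? (p :: t) key = some (t.foldl (fun m x => if key x < key m then x else m) p) := by
  induction t generalizing p with
  | nil => rfl
  | cons q t ih =>
    have h1 : PySem.List.min? (p :: q :: t) key
        = PySem.List.min? ((if key q < key p then q else p) :: t) key := by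
      unfold PySem.List.min?
      simp only [List.foldl_cons]
      split_ifs <;> rfl
    rw [h1, ih]
    simp only [List.foldl_cons]

lemma max?_cons (key : List Int → Int) (p : List Int) (t : List (List Int)) :
    PySem.List.max? (p :: t) key = some (t.foldl (fun m x => if key m < key x then x else m) p) := by
  induction t generalizing p with
  | nil => rfl
  | cons q t ih =>
    have h1 : PySem.List.max? (p :: q :: t) key
        = PySem.List.max? ((if key p < key q then q else p) :: t) key := by
      unfold PySem.List.max?
      simp only [List.foldl_cons]
      split_ifs <;> rfl
    rw [h1, ih]
    simp only [List.foldl_cons]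

-- ===== VERDICT (by name: the statement is the Claim_ definition above) =====
theorem checkBoundPt_spec : Claim_equal_checkBoundPt := by
  intro poly _ hpre
  obtain ⟨hne, -⟩ := hpre
  obtain ⟨p, t, rfl⟩ : ∃ p t, poly = p :: t := by
    cases poly with
    | nil => exact absurd rfl hne
    | cons p t => exact ⟨p, t, rfl⟩
  show checkBoundPt (p :: t) = checkBoundPt_alt (p :: t)
  unfold checkBoundPt checkBoundPt_alt
  rw [min?_cons, min?_cons, max?_cons, max?_cons]
  simp only [Option.getD_some]
  have hp0 : PySem.List.pyGetD (p :: t) 0 [] = p := by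
    simp [PySem.List.pyGetD, PySem.List.pyGet?, PySem.List.pyIdx?]
  rw [hp0]
  simp only [List.foldl_cons, lt_irrefl, gt_iff_lt, if_false]
  rw [PySem.List.foldl_prod_mk
        (f := fun (l : List Int) pt => if PySem.List.pyGetD pt 0 0 < PySem.List.pyGetD l 0 0 then pt else l)
        (g := fun (s : List Int × List Int × List Int) pt =>
          (if PySem.List.pyGetD pt 1 0 < PySem.List.pyGetD s.1 1 0 then pt else s.1,
           if PySem.List.pyGetD s.2.1 0 0 < PySem.List.pyGetD pt 0 0 then pt else s.2.1,
           if PySem.List.pyGetD s.2.2 1 0 < PySem.List.pyGetD pt 1 0 then pt else s.2.2))]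
  rw [PySem.List.foldl_prod_mk
        (f := fun (b : List Int) pt => if PySem.List.pyGetD pt 1 0 < PySem.List.pyGetD b 1 0 then pt else b)
        (g := fun (s : List Int × List Int) pt =>
          (if PySem.List.pyGetD s.1 0 0 < PySem.List.pyGetD pt 0 0 then pt else s.1,
           if PySem.List.pyGetD s.2 1 0 < PySem.List.pyGetD pt 1 0 then pt else s.2))]
  rw [PySem.List.foldl_prod_mk
        (f := fun (r : List Int) pt => if PySem.List.pyGetD r 0 0 < PySem.List.pyGetD pt 0 0 then pt else r)
        (g := fun (tp : List Int) pt => if PySem.List.pyGetD tp 1 0 < PySem.List.pyGetD pt 1 0 then pt else tp)]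
  rfl
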